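-- pv_equiv track=rewrite | github.com/dubiousmane/analytic-parser | analytics.py | recurring_payments
-- ===== SOURCE A (Python) =====
-- from collections import defaultdict, Counter
-- from typing import List, Dict
--
-- def recurring_payments(
--     transactions: List[Dict],
--     min_count: int = 2
-- ) -> Dict[str, int]:
--     """
--     Находит повторяющиеся траты по описанию
--     """
--     counter = Counter()
--
--     for tx in transactions:
--         if tx["direction"] != "expense":
--             continue
--
--         key = tx.get("description", "").upper()
--         counter[key] += 1
--
--     return {
--         desc: count
--         for desc, count in counter.items()
--         if count >= min_count
--     }
-- ===== SOURCE B (Python) =====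
-- def recurring_payments(transactions, min_count=2):
--     # Sort-and-group instead of hash counting: sort the uppercased expense
--     # descriptions, run-length encode the consecutive runs, then emit the run
--     # lengths >= min_count in first-occurrence order.
--     keys = [
--         tx.get("description", "").upper()
--         for tx in transactions
--         if tx["direction"] == "expense"
--     ]
--     runs = []  # (key, run length), one entry per distinct key
--     for k in sorted(keys):
--         if runs and runs[-1][0] == k:
--             runs[-1] = (k, runs[-1][1] + 1)
--         else:
--             runs.append((k, 1))
--     counts = dict(runs)
--     result = {}
--     for k in dict.fromkeys(keys):
--         c = counts.get(k, 0)
--         if c >= min_count: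
--             result[k] = c
--     return result
-- ===== Notes on version B (the rewrite author's own statement) =====
-- stated objective: alternative
-- what changed: Counting by sorting instead of hashing: B sorts the uppercased expense descriptions, run-length encodes the consecutive equal runs to get each key's count, and then emits the runs of length >= min_count in first-occurrence order, whereas A accumulates a Counter in one pass.
import Mathlib
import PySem

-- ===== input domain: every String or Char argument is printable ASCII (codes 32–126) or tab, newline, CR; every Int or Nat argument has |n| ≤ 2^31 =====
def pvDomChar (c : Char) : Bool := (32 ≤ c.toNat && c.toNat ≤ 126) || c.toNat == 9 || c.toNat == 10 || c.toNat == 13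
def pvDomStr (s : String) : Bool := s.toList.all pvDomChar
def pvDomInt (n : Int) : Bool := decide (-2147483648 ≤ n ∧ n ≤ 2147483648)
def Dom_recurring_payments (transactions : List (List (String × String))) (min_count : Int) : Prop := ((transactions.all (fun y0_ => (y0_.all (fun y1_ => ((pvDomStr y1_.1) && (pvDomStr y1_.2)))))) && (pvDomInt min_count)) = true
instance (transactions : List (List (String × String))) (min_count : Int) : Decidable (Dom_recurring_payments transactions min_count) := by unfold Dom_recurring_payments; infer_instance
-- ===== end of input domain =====

-- B counts by sorting + run-length encoding (emitted in first-occurrence order) instead of A's hash Counter; alternative algorithm, same results (return value only).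


-- ===== PORT A =====
-- A: one pass over transactions building a Counter keyed by the uppercased description,
-- then a dict comprehension keeping the counts ≥ min_count (keys of a Counter are unique,
-- so the comprehension's items are the filtered items list).
def recurring_payments (transactions : List (List (String × String))) (min_count : Int) : List (String × Int) :=
  let counter := transactions.foldl
    (fun (c : PySem.Dict String Int) tx =>
      if ((PySem.Dict.mk tx).getD "direction" "") ≠ "expense" then c
      else c.modify (PySem.Str.upper ((PySem.Dict.mk tx).getD "description" "")) 0 (· + 1))
    PySem.Dict.empty
  counter.items.filter (fun p => decide (min_count ≤ p.2))

-- ===== PORT B =====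
-- B: sort the uppercased expense descriptions, run-length encode the consecutive runs
-- (runs[-1] is getLast?, the in-place update of runs[-1] is dropLast ++ [·]), then emit
-- the counts ≥ min_count over the deduped keys (result keys are distinct, so each dict
-- assignment appends).
def recurring_payments_alt (transactions : List (List (String × String))) (min_count : Int) : List (String × Int) :=
  let keys := (transactions.filter
      (fun tx => (PySem.Dict.mk tx).getD "direction" "" == "expense")).map
    (fun tx => PySem.Str.upper ((PySem.Dict.mk tx).getD "description" ""))
  let runs := (PySem.List.sorted keys (fun k => k) false).foldl
    (fun (rs : List (String × Int)) k =>
      match rs.getLast? with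
      | some r => if r.1 == k then rs.dropLast ++ [(k, r.2 + 1)] else rs ++ [(k, 1)]
      | none => rs ++ [(k, 1)])
    []
  let counts := PySem.Dict.mk runs
  (PySem.List.dedup keys).foldl
    (fun res k =>
      let c := counts.getD k 0
      if min_count ≤ c then res ++ [(k, c)] else res)
    []

-- ===== PRECONDITION & SPEC =====
-- Pre_ excludes exactly the inputs where tx["direction"] raises KeyError in Python (both A and B raise there).
def Pre_recurring_payments (transactions : List (List (String × String))) (min_count : Int) : Prop :=
  ∀ tx ∈ transactions, tx.any (fun p => p.1 == "direction") = true
instance (transactions : List (List (String × String))) (min_count : Int) : Decidable (Pre_recurring_payments transactions min_count) := by unfold Pre_recurring_payments; infer_instance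
def pvWitness_recurring_payments : (List (List (String × String))) × Int :=
  ([[("direction", "expense"), ("description", "netflix")], [("direction", "income")]], 1)
def Spec_recurring_payments (transactions : List (List (String × String))) (min_count : Int) (out : List (String × Int)) : Prop := out = recurring_payments_alt transactions min_count
instance (transactions : List (List (String × String))) (min_count : Int) (out : List (String × Int)) : Decidable (Spec_recurring_payments transactions min_count out) := by unfold Spec_recurring_payments; infer_instance

-- ===== CLAIM (what is proved, stated in full; the proofs are below) =====
def Claim_equal_recurring_payments : Prop := ∀ (transactions : List (List (String × String))) (min_count : Int), Dom_recurring_payments transactions min_count → Pre_recurring_payments transactions min_count → Spec_recurring_payments transactions min_count (recurring_payments transactions min_count)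

-- ===== LEMMAS AND PROOFS =====

-- Structural specification of B's run-length-encoding loop: rleFrom k c t is the final
-- runs list given an open run (k, c) and remaining sorted keys t.
def pvRleFrom (k : String) (c : Int) : List String → List (String × Int)
  | [] => [(k, c)]
  | k' :: t => if k' = k then pvRleFrom k (c + 1) t else (k, c) :: pvRleFrom k' 1 t

theorem pv_foldl_step_concat (t : List String) (gs : List (String × Int)) (k : String) (c : Int) :
    t.foldl
      (fun (rs : List (String × Int)) k =>
        match rs.getLast? with
        | some r => if r.1 == k then rs.dropLast ++ [(k, r.2 + 1)] else rs ++ [(k, 1)]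
        | none => rs ++ [(k, 1)])
      (gs ++ [(k, c)]) = gs ++ pvRleFrom k c t := by
  induction t generalizing gs k c with
  | nil => simp [pvRleFrom]
  | cons k' t ih =>
    simp only [List.foldl_cons, List.getLast?_concat, List.dropLast_concat, pvRleFrom]
    by_cases h : k' = k
    · subst h
      simp only [beq_self_eq_true, if_true]
      exact ih gs k' (c + 1)
    · have hb : (k == k') = false := by simp [Ne.symm h]
      simp only [hb, if_neg h, Bool.false_eq_true, if_false]
      rw [show (gs ++ [(k, c)]) ++ [(k', 1)] = (gs ++ [(k, c)]) ++ [(k', 1)] from rfl,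
          ih (gs ++ [(k, c)]) k' 1]
      simp

-- Under sortedness, the RLE produces one (key, count) pair per distinct key.
theorem pv_rleFrom_eq (t : List String) (k : String) (c : Int)
    (hs : (k :: t).Pairwise (fun a b => a ≤ b)) :
    pvRleFrom k c t
      = (k, c + (t.count k : Int))
        :: (PySem.Set.discard (PySem.Set.ofList t) k).map (fun x => (x, (t.count x : Int))) := by
  induction t generalizing k c with
  | nil => simp [pvRleFrom, PySem.Set.discard]
  | cons k' t ih =>
    have hmapeq : ∀ x ∈ PySem.Set.discard (PySem.Set.ofList t) k',
        (fun x => (x, (List.count x (k' :: t) : Int))) x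
          = (fun x => (x, (List.count x t : Int))) x := by
      intro x hx
      have hxne : x ≠ k' := ((PySem.Set.mem_discard _ _ _).mp hx).2
      simp [Ne.symm hxne]
    by_cases h : k' = k
    · subst h
      rw [pvRleFrom, if_pos rfl, ih k' (c + 1) hs.tail]
      have hd : PySem.Set.discard (PySem.Set.ofList (k' :: t)) k'
          = PySem.Set.discard (PySem.Set.ofList t) k' := by
        rw [PySem.Set.ofList_cons]
        simp [PySem.Set.discard, List.filter_filter]
      rw [hd, List.count_cons_self, List.map_congr_left hmapeq]
      refine List.cons_eq_cons.mpr ⟨?_, rfl⟩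
      refine Prod.ext rfl ?_
      push_cast; ring
    · have hkk' : k < k' :=
        lt_of_le_of_ne (List.rel_of_pairwise_cons hs List.mem_cons_self) (fun he => h he.symm)
      have hknot : k ∉ k' :: t := by
        intro hmem
        rcases List.mem_cons.mp hmem with h1 | h2
        · exact h h1.symm
        · exact absurd hkk' (not_lt.mpr (List.rel_of_pairwise_cons hs.tail h2))
      rw [pvRleFrom, if_neg h, ih k' 1 hs.tail]
      have hc0 : List.count k (k' :: t) = 0 := List.count_eq_zero.mpr hknot
      have hdk : PySem.Set.discard (PySem.Set.ofList (k' :: t)) k = PySem.Set.ofList (k' :: t) := by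
        show (PySem.Set.ofList (k' :: t)).filter (fun y => !(y == k)) = _
        apply List.filter_eq_self.mpr
        intro x hx
        have hxm : x ≠ k := fun he => hknot (he ▸ (PySem.Set.mem_ofList _ _).mp hx)
        simp [hxm]
      rw [hc0, hdk, PySem.Set.ofList_cons, List.map_cons, List.count_cons_self,
          List.map_congr_left hmapeq]
      refine List.cons_eq_cons.mpr ⟨Prod.ext rfl (by push_cast; ring), ?_⟩
      refine List.cons_eq_cons.mpr ⟨Prod.ext rfl (by push_cast; ring), rfl⟩

theorem recurring_payments_eq_alt (transactions : List (List (String × String))) (min_count : Int) :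
    recurring_payments transactions min_count = recurring_payments_alt transactions min_count := by
  unfold recurring_payments recurring_payments_alt
  set keys := (transactions.filter
      (fun tx => (PySem.Dict.mk tx).getD "direction" "" == "expense")).map
    (fun tx => PySem.Str.upper ((PySem.Dict.mk tx).getD "description" "")) with hkeys
  -- A's counting loop is Counter(keys)
  have h1 : transactions.foldl
      (fun (c : PySem.Dict String Int) tx =>
        if ((PySem.Dict.mk tx).getD "direction" "") ≠ "expense" then c
        else c.modify (PySem.Str.upper ((PySem.Dict.mk tx).getD "description" "")) 0 (· + 1))
      PySem.Dict.empty = PySem.Dict.counter keys := by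
    rw [PySem.Dict.counter_eq_foldl, hkeys, List.foldl_map, List.foldl_filter]
    congr 1
    funext c tx
    by_cases h : (PySem.Dict.mk tx).getD "direction" "" = "expense" <;> simp [h]
  rw [h1]
  set ks := PySem.List.sorted keys (fun k => k) false with hks
  set step := fun (rs : List (String × Int)) (k : String) =>
      match rs.getLast? with
      | some r => if r.1 == k then rs.dropLast ++ [(k, r.2 + 1)] else rs ++ [(k, 1)]
      | none => rs ++ [(k, 1)] with hstep
  -- B's RLE loop produces one (key, count-in-ks) pair per distinct key of ks
  have hruns : ks.foldl step [] = (PySem.Set.ofList ks).map (fun x => (x, (ks.count x : Int))) := by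
    cases hk : ks with
    | nil => simp
    | cons k t =>
      have hpw : (k :: t).Pairwise (fun a b : String => a ≤ b) := by
        have h := PySem.List.sorted_pairwise keys (fun k => k) (κ := String)
        rw [← hks, hk] at h
        exact h
      have hfirst : step [] k = [] ++ [(k, 1)] := rfl
      rw [List.foldl_cons, hfirst, hstep, pv_foldl_step_concat t [] k 1, List.nil_append,
          pv_rleFrom_eq t k 1 hpw, PySem.Set.ofList_cons, List.map_cons, List.count_cons_self]
      refine List.cons_eq_cons.mpr ⟨Prod.ext rfl (by push_cast; ring), List.map_congr_left ?_⟩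
      intro x hx
      have hxne : x ≠ k := ((PySem.Set.mem_discard _ _ _).mp hx).2
      simp [Ne.symm hxne]
  -- hence the lookup table gives every key of `keys` its count in `keys`
  have hget : ∀ x ∈ keys, (PySem.Dict.mk (ks.foldl step [])).getD x 0 = (keys.count x : Int) := by
    intro x hx
    have hxks : x ∈ ks := by
      rw [hks]
      exact (PySem.List.mem_sorted _ _ _ _).mpr hx
    have hmem : (x, (ks.count x : Int)) ∈ ks.foldl step [] := by
      rw [hruns]
      exact List.mem_map.mpr ⟨x, (PySem.Set.mem_ofList _ _).mpr hxks, rfl⟩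
    have hnd : (PySem.Dict.mk (ks.foldl step [])).keys.Nodup := by
      show ((ks.foldl step []).map (·.1)).Nodup
      rw [hruns, List.map_map]
      have : ((fun p : String × Int => p.1) ∘ fun x => (x, (ks.count x : Int))) = id := rfl
      rw [this, List.map_id]
      exact PySem.Set.nodup_ofList ks
    have hD := PySem.Dict.getD_of_mem_items (d := PySem.Dict.mk (ks.foldl step [])) hmem hnd (d0 := 0)
    rw [hD, (PySem.List.sorted_perm keys (fun k => k) false).count_eq]
  -- B's output loop appends exactly the deduped keys whose count passes the threshold
  rw [show ((PySem.List.dedup keys).foldl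
        (fun res k =>
          let c := (PySem.Dict.mk (ks.foldl step [])).getD k 0
          if min_count ≤ c then res ++ [(k, c)] else res)
        [] : List (String × Int))
      = (PySem.List.dedup keys).foldl
        (fun res k =>
          if min_count ≤ (PySem.Dict.mk (ks.foldl step [])).getD k 0
          then res ++ [(k, (PySem.Dict.mk (ks.foldl step [])).getD k 0)] else res)
        [] from rfl,
    PySem.List.foldl_append_ite]
  have hsub : ∀ x ∈ PySem.List.dedup keys, x ∈ keys := fun x hx => (PySem.List.mem_dedup _ _).mp hx
  have hfc : (PySem.List.dedup keys).filter
        (fun x => decide (min_count ≤ (PySem.Dict.mk (ks.foldl step [])).getD x 0))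
      = (PySem.List.dedup keys).filter (fun x => decide (min_count ≤ (keys.count x : Int))) :=
    List.filter_congr (fun x hx => by rw [hget x (hsub x hx)])
  have hmc : ((PySem.List.dedup keys).filter (fun x => decide (min_count ≤ (keys.count x : Int)))).map
        (fun k => (k, (PySem.Dict.mk (ks.foldl step [])).getD k 0))
      = ((PySem.List.dedup keys).filter (fun x => decide (min_count ≤ (keys.count x : Int)))).map
        (fun k => (k, (keys.count k : Int))) :=
    List.map_congr_left (fun x hx => by rw [hget x (hsub x (List.mem_of_mem_filter hx))])
  rw [hfc, hmc, PySem.List.dedup_eq_ofList]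
  simp only [PySem.Dict.items_counter, List.filter_map, List.nil_append]
  rfl

-- ===== VERDICT (by name: the statement is the Claim_ definition above) =====
theorem recurring_payments_spec : Claim_equal_recurring_payments := by
  intro t m _ _
  unfold Spec_recurring_payments
  exact recurring_payments_eq_alt t m
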